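-- pv_equiv track=rewrite | github.com/hmnd1257/BOJ | 백준/Bronze/2609. 최대공약수와 최소공배수/최대공약수와 최소공배수.py | max_cnt
-- ===== SOURCE A (Python) =====
-- def max_cnt(cnt, a, b):
--     while True:
--         cnt += 1
--         if cnt%a == 0 and cnt%b == 0:
--             max_cnt = cnt
--             break
--     min_cnt = (a*b)//max_cnt
--     return max_cnt, min_cnt
-- ===== SOURCE B (Python) =====
-- def max_cnt(cnt, a, b):
--     x, y = abs(a), abs(b)
--     while y:
--         x, y = y, x % y
--     L = (abs(a) * abs(b)) // x          # |lcm(a, b)|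
--     m = L * (cnt // L + 1)              # smallest multiple of L strictly greater than cnt
--     return m, (a * b) // m
-- ===== Notes on version B (the rewrite author's own statement) =====
-- stated objective: faster
-- what changed: Replaces A's linear scan cnt+1, cnt+2, ... for the next common multiple by Euclid's gcd, lcm = |a*b|//gcd, and one floor division to jump directly to the next multiple of the lcm.
import Mathlib
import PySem

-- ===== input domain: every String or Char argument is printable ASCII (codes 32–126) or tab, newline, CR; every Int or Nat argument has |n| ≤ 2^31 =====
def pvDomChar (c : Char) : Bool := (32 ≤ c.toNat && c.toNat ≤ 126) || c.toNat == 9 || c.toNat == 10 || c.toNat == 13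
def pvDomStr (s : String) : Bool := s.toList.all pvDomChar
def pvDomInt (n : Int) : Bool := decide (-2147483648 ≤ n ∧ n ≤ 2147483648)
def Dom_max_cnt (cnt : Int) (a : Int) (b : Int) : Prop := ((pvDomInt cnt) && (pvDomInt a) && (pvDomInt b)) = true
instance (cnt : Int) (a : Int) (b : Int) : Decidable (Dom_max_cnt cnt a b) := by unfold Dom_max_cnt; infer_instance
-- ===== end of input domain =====

-- B replaces A's linear scan for the next common multiple by Euclid's gcd plus one floor
-- division (faster, asymptotically); equivalence is about the returned pair (as a 2-list).

-- ===== PORT A =====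
-- A's 'while True: cnt += 1; if cnt%a==0 and cnt%b==0: break', with a fuel bound that only
-- totalizes the recursion (fuel a.natAbs*b.natAbs+1 is proved sufficient whenever a ≠ 0 ∧ b ≠ 0).
def loopA (a b : Int) : Int → Nat → Option Int
  | _, 0 => none
  | c, f+1 =>
    if PySem.Int.mod (c+1) a = 0 ∧ PySem.Int.mod (c+1) b = 0 then some (c+1)
    else loopA a b (c+1) f

def max_cnt (cnt : Int) (a : Int) (b : Int) : List Int :=
  match loopA a b cnt (a.natAbs * b.natAbs + 1) with
  | some m => [m, PySem.Int.floordiv (a*b) m]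
  | none => []

-- ===== PORT B =====
-- Python-mod Euclid step shrinks |y| (termination of Source B's 'while y:' loop).
theorem pvNatAbsModLt (x y : Int) (hy : ¬ y = 0) : (PySem.Int.mod x y).natAbs < y.natAbs := by
  rcases lt_or_gt_of_ne hy with h | h
  · have h1 := PySem.Int.mod_neg_bounds x h
    omega
  · have h1 := PySem.Int.mod_nonneg x h
    have h2 := PySem.Int.mod_lt x h
    omega

-- Source B's 'while y: x, y = y, x % y'
def gcdLoop (x y : Int) : Int :=
  if _hy : y = 0 then x else gcdLoop y (PySem.Int.mod x y)
termination_by y.natAbs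
decreasing_by exact pvNatAbsModLt x y _hy

def max_cnt_alt (cnt : Int) (a : Int) (b : Int) : List Int :=
  let x := gcdLoop |a| |b|
  let L := PySem.Int.floordiv (|a| * |b|) x
  let m := L * (PySem.Int.floordiv cnt L + 1)
  [m, PySem.Int.floordiv (a*b) m]

-- ===== PRECONDITION & SPEC =====
-- Pre_ excludes exactly the inputs where Python A raises ZeroDivisionError: a = 0 or b = 0
-- (the test cnt % a), and -lcm(a,b) ≤ cnt < 0, where the scan stops at 0 and (a*b)//0 raises.
def Pre_max_cnt (cnt : Int) (a : Int) (b : Int) : Prop :=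
  a ≠ 0 ∧ b ≠ 0 ∧ (0 ≤ cnt ∨ cnt < -(Int.lcm a b : Int))
instance (cnt : Int) (a : Int) (b : Int) : Decidable (Pre_max_cnt cnt a b) := by
  unfold Pre_max_cnt; infer_instance
def pvWitness_max_cnt : Int × Int × Int := (0, 2, 3)

def Spec_max_cnt (cnt : Int) (a : Int) (b : Int) (out : List Int) : Prop := out = max_cnt_alt cnt a b
instance (cnt : Int) (a : Int) (b : Int) (out : List Int) : Decidable (Spec_max_cnt cnt a b out) := by unfold Spec_max_cnt; infer_instance

-- ===== CLAIM (what is proved, stated in full; the proofs are below) =====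
def Claim_equal_max_cnt : Prop := ∀ (cnt : Int) (a : Int) (b : Int), Dom_max_cnt cnt a b → Pre_max_cnt cnt a b → Spec_max_cnt cnt a b (max_cnt cnt a b)

-- ===== LEMMAS AND PROOFS =====

-- On Nat-cast arguments gcdLoop computes Nat.gcd.
theorem gcdLoop_natCast : ∀ (y x : Nat), gcdLoop (x : Int) (y : Int) = (Nat.gcd x y : Int) := by
  intro y
  induction y using Nat.strong_induction_on with
  | _ y ih =>
    intro x
    rw [gcdLoop]
    by_cases hy : (y : Int) = 0
    · have : y = 0 := by exact_mod_cast hy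
      subst this
      simp
    · have hy0 : y ≠ 0 := by exact_mod_cast hy
      rw [dif_neg hy]
      have hmod : PySem.Int.mod (x : Int) (y : Int) = ((x % y : Nat) : Int) :=
        PySem.Int.mod_natCast x y
      rw [hmod, ih (x % y) (Nat.mod_lt _ (Nat.pos_of_ne_zero hy0))]
      congr 1
      rw [Nat.gcd_comm y (x % y), ← Nat.gcd_rec y x, Nat.gcd_comm]

-- The driver loop of A returns the least common multiple candidate m above its start.
theorem loopA_finds (a b m c0 : Int) (hma : a ∣ m) (hmb : b ∣ m)
    (hmin : ∀ k, c0 < k → k < m → ¬(a ∣ k ∧ b ∣ k)) :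
    ∀ (fuel : Nat) (c : Int), c0 ≤ c → c < m → (m - c).toNat ≤ fuel →
      loopA a b c fuel = some m := by
  intro fuel
  induction fuel with
  | zero => intro c h0 hc hf; omega
  | succ f ih =>
    intro c h0 hc hf
    by_cases hm : c + 1 = m
    · have hA : PySem.Int.mod (c+1) a = 0 := by
        rw [PySem.Int.mod_eq_zero_iff_dvd]; rw [hm]; exact hma
      have hB : PySem.Int.mod (c+1) b = 0 := by
        rw [PySem.Int.mod_eq_zero_iff_dvd]; rw [hm]; exact hmb
      rw [loopA, if_pos ⟨hA, hB⟩, hm]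
    · have hlt : c + 1 < m := by omega
      have hnot := hmin (c+1) (by omega) hlt
      have hcond : ¬ (PySem.Int.mod (c+1) a = 0 ∧ PySem.Int.mod (c+1) b = 0) := by
        rw [PySem.Int.mod_eq_zero_iff_dvd, PySem.Int.mod_eq_zero_iff_dvd]
        exact hnot
      rw [loopA, if_neg hcond]
      exact ih (c+1) (by omega) hlt (by omega)

theorem max_cnt_spec_aux (cnt a b : Int) (ha : a ≠ 0) (hb : b ≠ 0) :
    max_cnt cnt a b = max_cnt_alt cnt a b := by
  -- names for gcd / lcm
  have hg0 : 0 < Int.gcd a b := Int.gcd_pos_of_ne_zero_left b ha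
  have hL0 : (0 : Int) < (Int.lcm a b : Int) := by
    exact_mod_cast Int.lcm_pos ha hb
  set L : Int := (Int.lcm a b : Int) with hLdef
  -- B's gcd equals Int.gcd
  have habs : |a| = ((a.natAbs : Nat) : Int) := Int.abs_eq_natAbs a
  have hbabs : |b| = ((b.natAbs : Nat) : Int) := Int.abs_eq_natAbs b
  have hgcd : gcdLoop |a| |b| = (Int.gcd a b : Int) := by
    rw [habs, hbabs, gcdLoop_natCast]; rfl
  -- B's L equals lcm
  have hprod : |a| * |b| = ((Int.gcd a b * Int.lcm a b : Nat) : Int) := by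
    have hn : Int.gcd a b * Int.lcm a b = a.natAbs * b.natAbs := Nat.gcd_mul_lcm _ _
    rw [habs, hbabs, ← Nat.cast_mul, hn]
  have hLB : PySem.Int.floordiv (|a| * |b|) (gcdLoop |a| |b|) = L := by
    rw [hgcd, hprod]
    rw [PySem.Int.floordiv_natCast]
    rw [Nat.mul_div_cancel_left _ hg0]
  -- the next multiple of L strictly above cnt
  set q : Int := PySem.Int.floordiv cnt L with hq
  obtain ⟨hq1, hq2⟩ := (PySem.Int.floordiv_eq_iff_of_pos hL0).mp hq.symm
  set m : Int := L * (q + 1) with hm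
  have hcm : cnt < m := by rw [hm]; nlinarith
  have hLm : L ∣ m := ⟨q + 1, rfl⟩
  have ham : a ∣ m := dvd_trans (Int.dvd_lcm_left a b) hLm
  have hbm : b ∣ m := dvd_trans (Int.dvd_lcm_right a b) hLm
  have hmin : ∀ k, cnt < k → k < m → ¬(a ∣ k ∧ b ∣ k) := by
    intro k hk1 hk2 ⟨hka, hkb⟩
    obtain ⟨t, ht⟩ := Int.coe_lcm_dvd hka hkb
    have htq : q < t := by
      by_contra hle
      push Not at hle
      have : k ≤ q * L := by
        rw [ht]; rw [mul_comm]
        exact mul_le_mul_of_nonneg_right hle (le_of_lt hL0)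
      omega
    have : m ≤ k := by
      rw [hm, ht]
      have : q + 1 ≤ t := by omega
      exact mul_le_mul_of_nonneg_left this (le_of_lt hL0)
    omega
  -- fuel bound: m - cnt ≤ L ≤ |a|*|b|
  have hLle : L ≤ |a| * |b| := by
    rw [hLdef, hprod]
    exact_mod_cast Nat.le_mul_of_pos_left _ hg0
  have hfuel : (m - cnt).toNat ≤ a.natAbs * b.natAbs + 1 := by
    have h1 : m - cnt ≤ L := by rw [hm]; nlinarith
    have h2 : |a| * |b| = ((a.natAbs * b.natAbs : Nat) : Int) := by
      rw [habs, hbabs]; push_cast; ring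
    omega
  have hloop := loopA_finds a b m cnt ham hbm hmin (a.natAbs * b.natAbs + 1) cnt
    le_rfl hcm hfuel
  -- assemble
  unfold max_cnt max_cnt_alt
  rw [hloop]
  simp only [hLB]
  rw [hm, hq]

-- ===== VERDICT (by name: the statement is the Claim_ definition above) =====
theorem max_cnt_spec : Claim_equal_max_cnt := by
  intro cnt a b _ hpre
  exact max_cnt_spec_aux cnt a b hpre.1 hpre.2.1
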